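-- pv_equiv track=rewrite | github.com/dyuhti/Design-And-Analysis-Of-Algorithm | labs/lab3/2D array.py | sum_of_queries_results
-- ===== SOURCE A (Python) =====
-- def max_sum_subsequence_no_adjacent(nums):
--     incl = 0
--     excl = 0
--
--     for num in nums:
--         new_excl = max(incl, excl)
--         incl = excl + num
--         excl = new_excl
--
--     return max(incl, excl)
--
-- def sum_of_queries_results(nums, queries):
--     MOD = 10 ** 9 + 7
--     total_sum = 0
--
--     for pos, val in queries:
--         nums[pos] = val
--         max_sum = max_sum_subsequence_no_adjacent(nums)
--         total_sum = (total_sum + max_sum) % MOD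
--
--     return total_sum
-- ===== SOURCE B (Python) =====
-- def sum_of_queries_results(nums, queries):
--     # Segment tree over max-plus 2x2 transition matrices; O(n + q log n).
--     # Like A, this mutates the caller's `nums` in place (nums[pos] = val).
--     MOD = 10 ** 9 + 7
--
--     def madd(x, y):
--         return None if x is None or y is None else x + y
--
--     def mmax(x, y):
--         if x is None:
--             return y
--         if y is None:
--             return x
--         return x if x >= y else y
--
--     def mleaf(x):
--         # DP step (incl, excl) -> (excl + x, max(incl, excl)) as a max-plus
--         # matrix (a, b, c, d); None stands for -infinity.
--         return (None, x, 0, 0)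
--
--     def mmul(p, q):
--         # composition: apply q first, then p
--         pa, pb, pc, pd = p
--         qa, qb, qc, qd = q
--         return (mmax(madd(pa, qa), madd(pb, qc)),
--                 mmax(madd(pa, qb), madd(pb, qd)),
--                 mmax(madd(pc, qa), madd(pd, qc)),
--                 mmax(madd(pc, qb), madd(pd, qd)))
--
--     def mval(t):
--         return t[1] if t[0] == 'leaf' else t[2]
--
--     def build(arr):
--         if len(arr) == 1:
--             return ('leaf', mleaf(arr[0]))
--         mid = len(arr) // 2
--         lt = build(arr[:mid])
--         rt = build(arr[mid:])
--         return ('node', mid, mmul(mval(rt), mval(lt)), lt, rt)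
--
--     def update(t, i, x):
--         if t[0] == 'leaf':
--             return ('leaf', mleaf(x))
--         _, lsz, _, lt, rt = t
--         if i < lsz:
--             lt = update(lt, i, x)
--         else:
--             rt = update(rt, i - lsz, x)
--         return ('node', lsz, mmul(mval(rt), mval(lt)), lt, rt)
--
--     n = len(nums)
--     tree = build(nums) if n else None
--     total = 0
--     for pos, val in queries:
--         nums[pos] = val          # same observable mutation as A; raises if out of range
--         i = pos if pos >= 0 else pos + n
--         tree = update(tree, i, val)
--         a, b, c, d = mval(tree)
--         m = mmax(mmax(a, b), mmax(c, d))
--         total = (total + (0 if m is None else m)) % MOD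
--     return total
-- ===== Notes on version B (the rewrite author's own statement) =====
-- stated objective: faster
-- what changed: B replaces A's per-query full O(n) incl/excl DP recomputation with a segment tree of max-plus 2x2 transition matrices built once, doing an O(log n) point update and reading the answer at the root for each query.
import Mathlib
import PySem

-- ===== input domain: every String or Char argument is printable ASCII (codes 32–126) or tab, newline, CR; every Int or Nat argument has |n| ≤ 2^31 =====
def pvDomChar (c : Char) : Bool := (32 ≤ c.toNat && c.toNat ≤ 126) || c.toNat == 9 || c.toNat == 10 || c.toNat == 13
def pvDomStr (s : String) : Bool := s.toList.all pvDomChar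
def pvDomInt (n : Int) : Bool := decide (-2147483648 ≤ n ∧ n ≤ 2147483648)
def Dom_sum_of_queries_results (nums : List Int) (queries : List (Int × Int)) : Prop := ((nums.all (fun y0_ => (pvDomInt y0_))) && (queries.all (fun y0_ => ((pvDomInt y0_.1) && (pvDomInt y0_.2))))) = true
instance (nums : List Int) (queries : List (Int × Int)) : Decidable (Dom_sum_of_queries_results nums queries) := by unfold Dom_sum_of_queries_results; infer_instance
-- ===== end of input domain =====

-- B replaces A's full O(n) non-adjacent-max DP recomputation per query with a segment tree of
-- max-plus 2x2 transition matrices (point update, O(n + q log n)); objective: faster (asymptotic).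
-- Both A and B mutate the caller's `nums` in place (nums[pos] = val); the equivalence proved
-- here is about the RETURN value.

-- ===== PORT A =====
-- max_sum_subsequence_no_adjacent: incl/excl DP loop
def max_sum_subsequence_no_adjacent (nums : List Int) : Int :=
  let p := nums.foldl (fun (s : Int × Int) num => (s.2 + num, max s.1 s.2)) (0, 0)
  max p.1 p.2

def sum_of_queries_results (nums : List Int) (queries : List (Int × Int)) : Int :=
  (queries.foldl
    (fun (s : List Int × Int) q =>
      let ns := PySem.List.pySetD s.1 q.1 q.2
      (ns, PySem.Int.mod (s.2 + max_sum_subsequence_no_adjacent ns) (10 ^ 9 + 7)))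
    (nums, 0)).2

-- ===== PORT B =====
-- entries are Option Int, none = -infinity
def maddO : Option Int → Option Int → Option Int
  | some a, some b => some (a + b)
  | _, _ => none

def mmaxO : Option Int → Option Int → Option Int
  | none, y => y
  | x, none => x
  | some a, some b => some (max a b)

-- max-plus 2x2 matrix (a, b, c, d)
abbrev MM := Option Int × Option Int × Option Int × Option Int

def mleaf (x : Int) : MM := (none, some x, some 0, some 0)

def mmul (p q : MM) : MM :=
  (mmaxO (maddO p.1 q.1) (maddO p.2.1 q.2.2.1),
   mmaxO (maddO p.1 q.2.1) (maddO p.2.1 q.2.2.2),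
   mmaxO (maddO p.2.2.1 q.1) (maddO p.2.2.2 q.2.2.1),
   mmaxO (maddO p.2.2.1 q.2.1) (maddO p.2.2.2 q.2.2.2))

inductive SegT where
  | leaf (m : MM)
  | node (lsz : Nat) (m : MM) (l r : SegT)

def SegT.mval : SegT → MM
  | .leaf m => m
  | .node _ m _ _ => m

def stBuild : List Int → SegT
  | [] => .leaf (mleaf 0)        -- unreachable: build is only called on nonempty lists
  | [x] => .leaf (mleaf x)
  | x :: y :: rest =>
    let arr := x :: y :: rest
    let mid := arr.length / 2
    let lt := stBuild (arr.take mid)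
    let rt := stBuild (arr.drop mid)
    .node mid (mmul rt.mval lt.mval) lt rt
termination_by l => l.length
decreasing_by
  · simp [List.length_take]; omega
  · simp; omega

def stUpdate : SegT → Nat → Int → SegT
  | .leaf _, _, x => .leaf (mleaf x)
  | .node lsz _ lt rt, i, x =>
    if i < lsz then
      let lt' := stUpdate lt i x
      .node lsz (mmul rt.mval lt'.mval) lt' rt
    else
      let rt' := stUpdate rt (i - lsz) x
      .node lsz (mmul rt'.mval lt.mval) lt rt'

def ansOf (m : MM) : Int :=
  match mmaxO (mmaxO m.1 m.2.1) (mmaxO m.2.2.1 m.2.2.2) with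
  | some v => v
  | none => 0

def sum_of_queries_results_alt (nums : List Int) (queries : List (Int × Int)) : Int :=
  let n : Int := nums.length
  let t0 := stBuild nums
  (queries.foldl
    (fun (s : SegT × Int) q =>
      let i := (if 0 ≤ q.1 then q.1 else q.1 + n).toNat
      let t := stUpdate s.1 i q.2
      (t, PySem.Int.mod (s.2 + ansOf t.mval) (10 ^ 9 + 7)))
    (t0, 0)).2

-- ===== PRECONDITION & SPEC =====
-- Pre_ excludes exactly the inputs where A raises IndexError: some query position out of range
def Pre_sum_of_queries_results (nums : List Int) (queries : List (Int × Int)) : Prop :=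
  ∀ q ∈ queries, PySem.Raise.InRange nums.length q.1
instance (nums : List Int) (queries : List (Int × Int)) : Decidable (Pre_sum_of_queries_results nums queries) := by unfold Pre_sum_of_queries_results; infer_instance

def pvWitness_sum_of_queries_results : List Int × (List (Int × Int)) :=
  ([3, -1, 4, 1, 5], [(0, 7), (-2, 2), (4, -3)])

def Spec_sum_of_queries_results (nums : List Int) (queries : List (Int × Int)) (out : Int) : Prop := out = sum_of_queries_results_alt nums queries
instance (nums : List Int) (queries : List (Int × Int)) (out : Int) : Decidable (Spec_sum_of_queries_results nums queries out) := by unfold Spec_sum_of_queries_results; infer_instance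

-- ===== CLAIM (what is proved, stated in full; the proofs are below) =====
def Claim_equal_sum_of_queries_results : Prop := ∀ (nums : List Int) (queries : List (Int × Int)), Dom_sum_of_queries_results nums queries → Pre_sum_of_queries_results nums queries → Spec_sum_of_queries_results nums queries (sum_of_queries_results nums queries)

-- ===== LEMMAS AND PROOFS =====

theorem maddO_assoc (a b c : Option Int) : maddO (maddO a b) c = maddO a (maddO b c) := by
  rcases a with _ | a <;> rcases b with _ | b <;> rcases c with _ | c <;>
    simp [maddO, Int.add_assoc]

theorem mmaxO_comm (a b : Option Int) : mmaxO a b = mmaxO b a := by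
  rcases a with _ | a <;> rcases b with _ | b <;> simp [mmaxO, max_comm]

theorem mmaxO_assoc (a b c : Option Int) : mmaxO (mmaxO a b) c = mmaxO a (mmaxO b c) := by
  rcases a with _ | a <;> rcases b with _ | b <;> rcases c with _ | c <;>
    simp [mmaxO, max_assoc]

theorem mmaxO_exchange (a b c d : Option Int) :
    mmaxO (mmaxO a b) (mmaxO c d) = mmaxO (mmaxO a c) (mmaxO b d) := by
  rw [mmaxO_assoc a b, ← mmaxO_assoc b c d, mmaxO_comm b c, mmaxO_assoc c b d,
      ← mmaxO_assoc a c]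

theorem maddO_mmaxO_left (a b c : Option Int) :
    maddO a (mmaxO b c) = mmaxO (maddO a b) (maddO a c) := by
  rcases a with _ | a <;> rcases b with _ | b <;> rcases c with _ | c <;>
    simp [maddO, mmaxO]

theorem maddO_mmaxO_right (a b c : Option Int) :
    maddO (mmaxO a b) c = mmaxO (maddO a c) (maddO b c) := by
  rcases a with _ | a <;> rcases b with _ | b <;> rcases c with _ | c <;>
    simp [maddO, mmaxO]

-- applying a matrix to a state vector (incl, excl)
def mapply (m : MM) (v : Option Int × Option Int) : Option Int × Option Int :=
  (mmaxO (maddO m.1 v.1) (maddO m.2.1 v.2),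
   mmaxO (maddO m.2.2.1 v.1) (maddO m.2.2.2 v.2))

theorem mapply_mmul (p q : MM) (v : Option Int × Option Int) :
    mapply (mmul p q) v = mapply p (mapply q v) := by
  obtain ⟨a, b, c, d⟩ := p
  obtain ⟨qa, qb, qc, qd⟩ := q
  obtain ⟨i, e⟩ := v
  simp only [mapply, mmul, maddO_mmaxO_left, maddO_mmaxO_right, maddO_assoc]
  rw [Prod.mk.injEq]
  constructor <;> rw [mmaxO_exchange]

-- the DP loop body of A, lifted
def foldW (l : List Int) (v : Option Int × Option Int) : Option Int × Option Int :=
  l.foldl (fun w x => mapply (mleaf x) w) v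

theorem mapply_mleaf (x : Int) (i e : Int) :
    mapply (mleaf x) (some i, some e) = (some (e + x), some (max i e)) := by
  simp [mapply, mleaf, maddO, mmaxO, Int.add_comm]

theorem foldW_lift (l : List Int) : ∀ (i e : Int),
    foldW l (some i, some e) =
      (some (l.foldl (fun (s : Int × Int) num => (s.2 + num, max s.1 s.2)) (i, e)).1,
       some (l.foldl (fun (s : Int × Int) num => (s.2 + num, max s.1 s.2)) (i, e)).2) := by
  induction l with
  | nil => intro i e; simp [foldW]
  | cons x t ih =>
    intro i e
    simp only [foldW, List.foldl_cons, mapply_mleaf] at *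
    exact ih (e + x) (max i e)

-- "tree t summarizes list l"
def SegModels : SegT → List Int → Prop
  | .leaf m, l => ∃ x, l = [x] ∧ m = mleaf x
  | .node lsz m a b, l => ∃ l1 l2, l = l1 ++ l2 ∧ l1 ≠ [] ∧ l2 ≠ [] ∧ lsz = l1.length ∧
      SegModels a l1 ∧ SegModels b l2 ∧ m = mmul b.mval a.mval

theorem stBuild_models_aux : ∀ (fuel : Nat) (l : List Int), l.length ≤ fuel → l ≠ [] →
    SegModels (stBuild l) l := by
  intro fuel
  induction fuel with
  | zero =>
    intro l hl hne
    cases l with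
    | nil => exact absurd rfl hne
    | cons a t => simp at hl
  | succ k ih =>
    intro l hl hne
    match l with
    | [x] => rw [stBuild]; exact ⟨x, rfl, rfl⟩
    | x :: y :: rest =>
      rw [stBuild]
      have hlen : (x :: y :: rest).length = rest.length + 2 := by simp
      have htl : ((x :: y :: rest).take ((x :: y :: rest).length / 2)).length =
          (x :: y :: rest).length / 2 := by
        simp [List.length_take]; omega
      have hdl : ((x :: y :: rest).drop ((x :: y :: rest).length / 2)).length =
          (x :: y :: rest).length - (x :: y :: rest).length / 2 := by
        simp
      have htne : (x :: y :: rest).take ((x :: y :: rest).length / 2) ≠ [] := by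
        intro hc; rw [hc] at htl; simp at htl; omega
      have hdne : (x :: y :: rest).drop ((x :: y :: rest).length / 2) ≠ [] := by
        intro hc; rw [hc] at hdl; simp at hdl; omega
      simp only [List.length_cons] at hl
      exact ⟨(x :: y :: rest).take ((x :: y :: rest).length / 2),
        (x :: y :: rest).drop ((x :: y :: rest).length / 2),
        (List.take_append_drop _ _).symm, htne, hdne, htl.symm,
        ih _ (by rw [htl]; omega) htne,
        ih _ (by rw [hdl]; omega) hdne, rfl⟩

theorem stBuild_models (l : List Int) (hne : l ≠ []) : SegModels (stBuild l) l :=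
  stBuild_models_aux l.length l le_rfl hne

theorem foldW_append (l1 l2 : List Int) (v : Option Int × Option Int) :
    foldW (l1 ++ l2) v = foldW l2 (foldW l1 v) := by
  simp [foldW, List.foldl_append]

theorem models_mapply : ∀ (t : SegT) (l : List Int), SegModels t l →
    ∀ v, mapply t.mval v = foldW l v := by
  intro t
  induction t with
  | leaf m =>
    intro l h v
    obtain ⟨x, rfl, rfl⟩ := h
    simp [SegT.mval, foldW]
  | node lsz m a b iha ihb =>
    intro l h v
    obtain ⟨l1, l2, rfl, _, _, _, h1, h2, rfl⟩ := h
    calc mapply (SegT.node lsz (mmul b.mval a.mval) a b).mval v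
        = mapply b.mval (mapply a.mval v) := mapply_mmul _ _ _
      _ = foldW l2 (foldW l1 v) := by rw [iha l1 h1, ihb l2 h2]
      _ = foldW (l1 ++ l2) v := (foldW_append l1 l2 v).symm

theorem models_update : ∀ (t : SegT) (l : List Int) (i : Nat) (x : Int), SegModels t l →
    i < l.length → SegModels (stUpdate t i x) (l.set i x) := by
  intro t
  induction t with
  | leaf m =>
    intro l i x h hi
    obtain ⟨y, rfl, rfl⟩ := h
    have : i = 0 := by simp at hi; omega
    subst this
    exact ⟨x, rfl, rfl⟩
  | node lsz m a b iha ihb =>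
    intro l i x h hi
    obtain ⟨l1, l2, rfl, h1n, h2n, rfl, h1, h2, rfl⟩ := h
    rw [List.set_append]
    by_cases hlt : i < l1.length
    · simp only [hlt, if_true, stUpdate]
      exact ⟨l1.set i x, l2, rfl, by simp [List.set_eq_nil_iff] at *; tauto, h2n,
        (by simp), iha l1 i x h1 hlt, h2, rfl⟩
    · simp only [hlt, if_false, stUpdate]
      have hlen : i - l1.length < l2.length := by
        simp [List.length_append] at hi; omega
      exact ⟨l1, l2.set (i - l1.length) x, rfl, h1n,
        by simp [List.set_eq_nil_iff] at *; tauto, rfl, h1,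
        ihb l2 (i - l1.length) x h2 hlen, rfl⟩

theorem maddO_some_zero (a : Option Int) : maddO a (some 0) = a := by
  rcases a with _ | a <;> simp [maddO]

theorem models_ans (t : SegT) (l : List Int) (h : SegModels t l) :
    ansOf t.mval = max_sum_subsequence_no_adjacent l := by
  have happ := models_mapply t l h (some 0, some 0)
  rw [foldW_lift] at happ
  rcases hmv : t.mval with ⟨a, b, c, d⟩
  rw [hmv] at happ
  simp only [mapply, maddO_some_zero, Prod.mk.injEq] at happ
  obtain ⟨h1, h2⟩ := happ
  show (match mmaxO (mmaxO a b) (mmaxO c d) with | some v => v | none => 0) = _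
  rw [h1, h2]
  simp [mmaxO, max_sum_subsequence_no_adjacent]

-- main loop invariant
theorem main_loop : ∀ (qs : List (Int × Int)) (cur : List Int) (t : SegT) (acc : Int)
    (n : Int), SegModels t cur → n = (cur.length : Int) →
    (∀ q ∈ qs, PySem.Raise.InRange cur.length q.1) →
    (qs.foldl
      (fun (s : List Int × Int) q =>
        let ns := PySem.List.pySetD s.1 q.1 q.2
        (ns, PySem.Int.mod (s.2 + max_sum_subsequence_no_adjacent ns) (10 ^ 9 + 7)))
      (cur, acc)).2 =
    (qs.foldl
      (fun (s : SegT × Int) q =>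
        let i := (if 0 ≤ q.1 then q.1 else q.1 + n).toNat
        let t := stUpdate s.1 i q.2
        (t, PySem.Int.mod (s.2 + ansOf t.mval) (10 ^ 9 + 7)))
      (t, acc)).2 := by
  intro qs
  induction qs with
  | nil => intro cur t acc n _ _ _; rfl
  | cons q qs ih =>
    intro cur t acc n hm hn hpre
    obtain ⟨pos, v⟩ := q
    obtain ⟨hlo, hhi⟩ : PySem.Raise.InRange cur.length pos :=
      hpre _ (List.mem_cons_self ..)
    have hset : PySem.List.pySetD cur pos v =
        cur.set (if 0 ≤ pos then pos else pos + n).toNat v := by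
      by_cases hp : 0 ≤ pos
      · simp [PySem.List.pySetD, PySem.List.pySet?, PySem.List.pyIdx?, hp, hhi]
      · simp [PySem.List.pySetD, PySem.List.pySet?, PySem.List.pyIdx?, hp, hlo]
        congr 1
        omega
    have hidx : (if 0 ≤ pos then pos else pos + n).toNat < cur.length := by
      by_cases hp : 0 ≤ pos <;> simp [hp] <;> omega
    have hm' := models_update t cur _ v hm hidx
    simp only [List.foldl_cons, hset]
    exact (ih (cur.set _ v) _ _ n hm' (by simpa using hn)
      (by intro q hq; simpa using hpre q (List.mem_cons_of_mem _ hq))).trans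
      (by rw [models_ans _ _ hm'])

-- ===== VERDICT (by name: the statement is the Claim_ definition above) =====
theorem sum_of_queries_results_spec : Claim_equal_sum_of_queries_results := by
  intro nums queries _ hpre
  show _ = sum_of_queries_results_alt nums queries
  unfold sum_of_queries_results sum_of_queries_results_alt
  cases queries with
  | nil => rfl
  | cons q qs =>
    have hne : nums ≠ [] := by
      obtain ⟨h1, h2⟩ := hpre q (List.mem_cons_self ..)
      intro h; subst h; simp at h1 h2; omega
    exact main_loop (q :: qs) nums (stBuild nums) 0 nums.length
      (stBuild_models nums hne) rfl hpre
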